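-- pv_equiv track=rewrite | github.com/dongho108/breaking-codingtest | wooteco/exam/7.py | solution
-- ===== SOURCE A (Python) =====
-- def wise(map):
--     new_map = []
--     for i in range(len(map)):
--         temp = []
--         for j in range(len(map[i])):
--             temp.append(map[i][j])
--         new_map.append(temp)
--
--     for i in range(len(map)):
--         x, y = i, len(map) - 1 - i
--         nx, ny = len(map) - 1, 2 * i
--         new_map[x][y] = map[nx][ny]
--
--         for j in range(i):
--             new_map[x][y+1] = map[nx][ny-1]
--             new_map[x][y+2] = map[nx-1][ny-1]
--             y += 2
--             nx -= 1
--             ny -= 1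
--     return new_map
--
-- def counter_wise(map):
--     new_map = []
--     for i in range(len(map)):
--         temp = []
--         for j in range(len(map[i])):
--             temp.append(map[i][j])
--         new_map.append(temp)
--
--     nx, ny = len(map), len(map[0])
--     for i in range(len(map)):
--         x, y = i, len(map) - 1 - i
--         nx, ny = nx - 1, ny - 1
--         new_map[x][y] = map[nx][ny]
--
--         tx, ty = nx, ny
--         for j in range(i):
--             new_map[x][y + 1] = map[tx + 1][ty]
--             new_map[x][y + 2] = map[tx + 1][ty - 1]
--             y += 2
--             tx += 1
--             ty -= 1
--     return new_map
--
-- def solution(grid, clockwise):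
--     answer = []
--     rows = len(grid)
--     cols = 2 * (len(grid) - 1) + 1
--     new_grid = [['.'] * cols for _ in range(rows)]
--     for i in range(rows):
--         for j in range(len(grid[i])):
--             new_grid[i][rows - 1 - i + j] = grid[i][j]
--
--     if clockwise:
--         new_grid = wise(new_grid)
--     else:
--         new_grid = counter_wise(new_grid)
--
--     for i in range(rows):
--         temp = ""
--         for j in range(cols):
--             if new_grid[i][j] != '.':
--                 temp += new_grid[i][j]
--         answer.append(temp)
--     return answer
-- ===== SOURCE B (Python) =====
-- def _cell(grid, i, k):
--     # value of the dot-padded grid at triangle coordinates (row i, offset k)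
--     row = grid[i]
--     return row[k] if 0 <= k < len(row) else '.'
--
--
-- def solution(grid, clockwise):
--     n = len(grid)
--     out = []
--     for i in range(n):
--         chars = []
--         for y in range(2 * n - 1):
--             k = y - (n - 1 - i)
--             if 0 <= k <= 2 * i:
--                 # closed-form source of the 120-degree rotation, in triangle coords
--                 if clockwise:
--                     si, sk = n - 1 - k // 2, 2 * i - k
--                 else:
--                     si, sk = (n - 1 - i) + (k + 1) // 2, 2 * (n - 1 - i) + k % 2
--             else:
--                 si, sk = i, k
--             c = _cell(grid, si, sk)
--             if c != '.':
--                 chars.append(c)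
--         out.append(''.join(chars))
--     return out
-- ===== Notes on version B (the rewrite author's own statement) =====
-- stated objective: simpler
-- what changed: Replaced A's mutate-in-place padded grid with its two stateful diagonal pointer walks (wise/counter_wise) by a direct per-cell closed-form coordinate mapping: each output cell reads its rotated source straight from the input rows, so no padded grid is built and no incremental pointers or copies are maintained.
import Mathlib
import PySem

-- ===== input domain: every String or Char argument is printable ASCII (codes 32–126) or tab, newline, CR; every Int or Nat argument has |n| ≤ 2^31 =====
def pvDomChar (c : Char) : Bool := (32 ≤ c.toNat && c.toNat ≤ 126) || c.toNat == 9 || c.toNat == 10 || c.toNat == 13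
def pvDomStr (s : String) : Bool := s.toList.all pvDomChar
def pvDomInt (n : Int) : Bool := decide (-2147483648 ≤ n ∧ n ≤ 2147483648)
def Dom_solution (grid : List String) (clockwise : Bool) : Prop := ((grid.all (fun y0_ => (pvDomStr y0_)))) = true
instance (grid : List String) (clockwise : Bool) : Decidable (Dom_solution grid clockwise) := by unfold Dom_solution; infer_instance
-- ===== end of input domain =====

-- B replaces A's stateful diagonal pointer walks over a mutated padded grid by a per-cell
-- closed-form coordinate mapping read directly off the input rows (objective: simpler).

-- ===== PORT A =====
-- 2D read/write helpers for the list-of-lists grid (Python's m[x][y] and m[x][y] = c;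
-- within Pre_ every index A uses is in range and nonnegative, so Nat indices are exact).
def pvGet2 (m : List (List Char)) (x y : Nat) : Char := (m.getD x []).getD y '.'

def pvSet2 (m : List (List Char)) (x y : Nat) (c : Char) : List (List Char) :=
  m.modify x (fun r => r.set y c)

-- the element-by-element copy loops at the top of wise/counter_wise
def pvCopyRow (row : List Char) : List Char :=
  (List.range row.length).foldl (fun t j => t ++ [row.getD j '.']) []

def pvCopy (m : List (List Char)) : List (List Char) :=
  (List.range m.length).foldl (fun nm i => nm ++ [pvCopyRow (m.getD i [])]) []

-- body of wise's inner 'for j in range(i)' loop; state (new_map, y, nx, ny)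
def pvWiseStep (map : List (List Char)) (x : Nat)
    (s : List (List Char) × Nat × Nat × Nat) (_ : Nat) :
    List (List Char) × Nat × Nat × Nat :=
  (pvSet2 (pvSet2 s.1 x (s.2.1 + 1) (pvGet2 map s.2.2.1 (s.2.2.2 - 1)))
      x (s.2.1 + 2) (pvGet2 map (s.2.2.1 - 1) (s.2.2.2 - 1)),
    s.2.1 + 2, s.2.2.1 - 1, s.2.2.2 - 1)

-- body of wise's outer 'for i in range(len(map))' loop
def pvWiseOuter (map : List (List Char)) (nm : List (List Char)) (i : Nat) :
    List (List Char) :=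
  ((List.range i).foldl (pvWiseStep map i)
    (pvSet2 nm i (map.length - 1 - i) (pvGet2 map (map.length - 1) (2 * i)),
      map.length - 1 - i, map.length - 1, 2 * i)).1

def wiseA (map : List (List Char)) : List (List Char) :=
  (List.range map.length).foldl (pvWiseOuter map) (pvCopy map)

-- body of counter_wise's inner 'for j in range(i)' loop; state (new_map, y, tx, ty)
def pvCcwStep (map : List (List Char)) (x : Nat)
    (s : List (List Char) × Nat × Nat × Nat) (_ : Nat) :
    List (List Char) × Nat × Nat × Nat :=
  (pvSet2 (pvSet2 s.1 x (s.2.1 + 1) (pvGet2 map (s.2.2.1 + 1) s.2.2.2))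
      x (s.2.1 + 2) (pvGet2 map (s.2.2.1 + 1) (s.2.2.2 - 1)),
    s.2.1 + 2, s.2.2.1 + 1, s.2.2.2 - 1)

-- body of counter_wise's outer loop; state (new_map, nx, ny)
def pvCcwOuter (map : List (List Char))
    (s : List (List Char) × Nat × Nat) (i : Nat) : List (List Char) × Nat × Nat :=
  let nx := s.2.1 - 1
  let ny := s.2.2 - 1
  (((List.range i).foldl (pvCcwStep map i)
      (pvSet2 s.1 i (map.length - 1 - i) (pvGet2 map nx ny),
        map.length - 1 - i, nx, ny)).1, nx, ny)

def counterWiseA (map : List (List Char)) : List (List Char) :=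
  ((List.range map.length).foldl (pvCcwOuter map)
    (pvCopy map, map.length, (map.getD 0 []).length)).1

-- body of solution's padding loop 'for j in range(len(grid[i]))'
def pvFillOuter (grid : List String) (ng : List (List Char)) (i : Nat) :
    List (List Char) :=
  (List.range ((grid.getD i "").toList.length)).foldl
    (fun ng' j => pvSet2 ng' i (grid.length - 1 - i + j) ((grid.getD i "").toList.getD j '.'))
    ng

-- cols = 2*(rows-1)+1 as a Nat: when rows = 0 Python's value is -1, but then no loop
-- below runs over it (both iterate inside range(rows)), so the Nat value is never used.
def solution (grid : List String) (clockwise : Bool) : List String :=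
  let rows := grid.length
  let cols := 2 * (rows - 1) + 1
  let ng0 : List (List Char) := (List.range rows).map (fun _ => List.replicate cols '.')
  let ng1 := (List.range rows).foldl (pvFillOuter grid) ng0
  let ng2 := if clockwise then wiseA ng1 else counterWiseA ng1
  (List.range rows).foldl (fun answer i =>
    answer ++ [String.mk ((List.range cols).foldl
      (fun temp j => if pvGet2 ng2 i j ≠ '.' then temp ++ [pvGet2 ng2 i j] else temp) [])]) []

-- ===== PORT B =====
-- Source B's _cell: value of the dot-padded grid at triangle coordinates (row i, offset k);
-- B only ever calls it with 0 ≤ i < len(grid), so getD i.toNat is exact.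
def pvCellB (grid : List String) (i : Int) (k : Int) : Char :=
  let row := (grid.getD i.toNat "").toList
  if 0 ≤ k ∧ k < (row.length : Int) then row.getD k.toNat '.' else '.'

def solution_alt (grid : List String) (clockwise : Bool) : List String :=
  let n := grid.length
  (List.range n).map (fun (i : Nat) =>
    String.mk ((List.range (2 * n - 1)).filterMap (fun (y : Nat) =>
      let k : Int := (y : Int) - ((n : Int) - 1 - (i : Int))
      let sik : Int × Int :=
        if 0 ≤ k ∧ k ≤ 2 * (i : Int) then
          if clockwise then ((n : Int) - 1 - PySem.Int.floordiv k 2, 2 * (i : Int) - k)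
          else ((n : Int) - 1 - (i : Int) + PySem.Int.floordiv (k + 1) 2,
                2 * ((n : Int) - 1 - (i : Int)) + PySem.Int.mod k 2)
        else ((i : Int), k)
      let c := pvCellB grid sik.1 sik.2
      if c ≠ '.' then some c else none)))

-- ===== PRECONDITION & SPEC =====
-- A raises IndexError when grid = [] with clockwise = false (counter_wise reads map[0]),
-- and when some row i is longer than len(grid)+i (the padding write falls off row i).
def Pre_solution (grid : List String) (clockwise : Bool) : Prop :=
  (clockwise = true ∨ grid ≠ []) ∧
    ∀ i, i < grid.length → (grid.getD i "").toList.length ≤ grid.length + i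

instance (grid : List String) (clockwise : Bool) : Decidable (Pre_solution grid clockwise) := by
  unfold Pre_solution; infer_instance

def pvWitness_solution : List String × Bool := (["a", "bcd"], false)

def Spec_solution (grid : List String) (clockwise : Bool) (out : List String) : Prop :=
  out = solution_alt grid clockwise
instance (grid : List String) (clockwise : Bool) (out : List String) : Decidable (Spec_solution grid clockwise out) := by unfold Spec_solution; infer_instance

-- ===== CLAIM (what is proved, stated in full; the proofs are below) =====
def Claim_equal_solution : Prop := ∀ (grid : List String) (clockwise : Bool), Dom_solution grid clockwise → Pre_solution grid clockwise → Spec_solution grid clockwise (solution grid clockwise)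

-- ===== LEMMAS AND PROOFS =====

-- ---- write lists: each loop body only stores values read from the untouched `map`,
-- ---- so a loop is a list of (row, col, value) writes applied in order ----
def applyW (m : List (List Char)) (ws : List (Nat × Nat × Char)) : List (List Char) :=
  ws.foldl (fun acc w => pvSet2 acc w.1 w.2.1 w.2.2) m

def lastW (ws : List (Nat × Nat × Char)) (j : Nat) (d : Char) : Char :=
  ws.foldl (fun acc w => if w.2.1 = j then w.2.2 else acc) d

theorem length_pvSet2 (m : List (List Char)) (x y : Nat) (c : Char) :
    (pvSet2 m x y c).length = m.length := by
  simp [pvSet2]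

theorem getD_pvSet2 (m : List (List Char)) (x y : Nat) (c : Char) (i : Nat) :
    (pvSet2 m x y c).getD i [] = if x = i then (m.getD i []).set y c else m.getD i [] := by
  simp only [pvSet2, List.getD_eq_getElem?_getD, List.getElem?_modify]
  split_ifs with h
  · cases hm : m[i]? <;> simp
  · simp

theorem pvGet2_pvSet2_self (m : List (List Char)) (x y : Nat) (c : Char)
    (hy : y < (m.getD x []).length) :
    pvGet2 (pvSet2 m x y c) x y = c := by
  simp only [pvGet2, getD_pvSet2, if_pos rfl]
  rw [List.getD_eq_getElem _ _ (by simpa using hy)]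
  simp

theorem pvGet2_pvSet2_ne (m : List (List Char)) (x y : Nat) (c : Char) (i j : Nat)
    (h : ¬(x = i ∧ y = j)) :
    pvGet2 (pvSet2 m x y c) i j = pvGet2 m i j := by
  simp only [pvGet2, getD_pvSet2]
  split_ifs with hx
  · have hyj : y ≠ j := fun hyj => h ⟨hx, hyj⟩
    simp [List.getD_eq_getElem?_getD, List.getElem?_set_ne hyj]
  · rfl

theorem applyW_append (m : List (List Char)) (ws₁ ws₂ : List (Nat × Nat × Char)) :
    applyW m (ws₁ ++ ws₂) = applyW (applyW m ws₁) ws₂ := by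
  simp [applyW]

theorem length_applyW (m : List (List Char)) (ws : List (Nat × Nat × Char)) :
    (applyW m ws).length = m.length := by
  induction ws generalizing m with
  | nil => rfl
  | cons w ws ih =>
    show (applyW (pvSet2 m w.1 w.2.1 w.2.2) ws).length = _
    rw [ih, length_pvSet2]

theorem rowlen_applyW (m : List (List Char)) (ws : List (Nat × Nat × Char)) (i : Nat) :
    ((applyW m ws).getD i []).length = (m.getD i []).length := by
  induction ws generalizing m with
  | nil => rfl
  | cons w ws ih =>
    show ((applyW (pvSet2 m w.1 w.2.1 w.2.2) ws).getD i []).length = _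
    rw [ih, getD_pvSet2]
    split_ifs <;> simp

theorem pvGet2_applyW_ne (m : List (List Char)) (ws : List (Nat × Nat × Char)) (i j : Nat)
    (h : ∀ w ∈ ws, w.1 ≠ i) :
    pvGet2 (applyW m ws) i j = pvGet2 m i j := by
  induction ws generalizing m with
  | nil => rfl
  | cons w ws ih =>
    show pvGet2 (applyW (pvSet2 m w.1 w.2.1 w.2.2) ws) i j = _
    rw [ih _ (fun w hw => h w (List.mem_cons_of_mem _ hw)),
      pvGet2_pvSet2_ne _ _ _ _ _ _ (fun hc => h w List.mem_cons_self hc.1)]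

theorem lastW_cons (w : Nat × Nat × Char) (ws : List (Nat × Nat × Char)) (j : Nat) (d : Char) :
    lastW (w :: ws) j d = lastW ws j (if w.2.1 = j then w.2.2 else d) := rfl

theorem lastW_append (ws₁ ws₂ : List (Nat × Nat × Char)) (j : Nat) (d : Char) :
    lastW (ws₁ ++ ws₂) j d = lastW ws₂ j (lastW ws₁ j d) := by
  simp [lastW]

theorem pvGet2_applyW_row (m : List (List Char)) (ws : List (Nat × Nat × Char)) (i j : Nat)
    (hrow : ∀ w ∈ ws, w.1 = i)
    (hcol : ∀ w ∈ ws, w.2.1 < (m.getD i []).length) :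
    pvGet2 (applyW m ws) i j = lastW ws j (pvGet2 m i j) := by
  induction ws generalizing m with
  | nil => rfl
  | cons w ws ih =>
    have hw1 : w.1 = i := hrow w List.mem_cons_self
    have hwc : w.2.1 < (m.getD i []).length := hcol w List.mem_cons_self
    show pvGet2 (applyW (pvSet2 m w.1 w.2.1 w.2.2) ws) i j = _
    rw [lastW_cons, ih _ (fun v hv => hrow v (List.mem_cons_of_mem _ hv))
        (fun v hv => by rw [getD_pvSet2]; split_ifs <;>
          simpa using hcol v (List.mem_cons_of_mem _ hv))]
    congr 1
    subst hw1
    by_cases hj : w.2.1 = j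
    · subst hj; rw [pvGet2_pvSet2_self _ _ _ _ hwc, if_pos rfl]
    · rw [pvGet2_pvSet2_ne _ _ _ _ _ _ (fun hc => hj hc.2), if_neg hj]

-- ---- a fold that applies one write list per row index ----
def rowFold (rows : Nat → List (Nat × Nat × Char)) (nm : List (List Char)) (M : Nat) :
    List (List Char) :=
  (List.range M).foldl (fun nm' i => applyW nm' (rows i)) nm

theorem rowFold_succ (rows : Nat → List (Nat × Nat × Char)) (nm : List (List Char)) (M : Nat) :
    rowFold rows nm (M + 1) = applyW (rowFold rows nm M) (rows M) := by
  simp [rowFold, List.range_succ]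

theorem length_rowFold (rows : Nat → List (Nat × Nat × Char)) (nm : List (List Char)) (M : Nat) :
    (rowFold rows nm M).length = nm.length := by
  induction M with
  | zero => rfl
  | succ M ih => rw [rowFold_succ, length_applyW, ih]

theorem rowlen_rowFold (rows : Nat → List (Nat × Nat × Char)) (nm : List (List Char))
    (M i : Nat) : ((rowFold rows nm M).getD i []).length = (nm.getD i []).length := by
  induction M with
  | zero => rfl
  | succ M ih => rw [rowFold_succ, rowlen_applyW, ih]

theorem pvGet2_rowFold_untouched (rows : Nat → List (Nat × Nat × Char))
    (hrows : ∀ i, ∀ w ∈ rows i, w.1 = i)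
    (nm : List (List Char)) (M i j : Nat) (hMi : M ≤ i) :
    pvGet2 (rowFold rows nm M) i j = pvGet2 nm i j := by
  induction M with
  | zero => rfl
  | succ M ih =>
    rw [rowFold_succ, pvGet2_applyW_ne _ _ _ _
      (fun w hw => by rw [hrows M w hw]; omega), ih (by omega)]

theorem pvGet2_rowFold_row (rows : Nat → List (Nat × Nat × Char))
    (hrows : ∀ i, ∀ w ∈ rows i, w.1 = i)
    (nm : List (List Char)) (M i j : Nat) (hiM : i < M)
    (hcol : ∀ w ∈ rows i, w.2.1 < (nm.getD i []).length) :
    pvGet2 (rowFold rows nm M) i j = lastW (rows i) j (pvGet2 nm i j) := by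
  induction M with
  | zero => omega
  | succ M ih =>
    rw [rowFold_succ]
    by_cases hi : i = M
    · subst hi
      rw [pvGet2_applyW_row _ _ _ _ (hrows i)
          (fun w hw => by rw [rowlen_rowFold]; exact hcol w hw),
        pvGet2_rowFold_untouched rows hrows nm i i j le_rfl]
    · rw [pvGet2_applyW_ne _ _ _ _ (fun w hw => by rw [hrows M w hw]; omega),
        ih (by omega)]

-- ---- the copy loops are the identity ----
theorem pvCopyRow_eq (row : List Char) : pvCopyRow row = row := by
  rw [pvCopyRow, PySem.List.foldl_append_singleton_eq_map, List.nil_append]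
  apply List.ext_getElem (by simp)
  intro i h1 h2
  simp only [List.getElem_map, List.getElem_range]
  rw [List.getD_eq_getElem _ _ h2]

theorem pvCopy_eq (m : List (List Char)) : pvCopy m = m := by
  rw [pvCopy, PySem.List.foldl_append_singleton_eq_map, List.nil_append]
  apply List.ext_getElem (by simp)
  intro i h1 h2
  simp only [List.getElem_map, List.getElem_range, pvCopyRow_eq]
  rw [List.getD_eq_getElem _ _ h2]

-- ---- the write lists of the three loops ----
def cwPairs (map : List (List Char)) (i T y nx ny : Nat) : List (Nat × Nat × Char) :=
  (List.range T).flatMap (fun t =>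
    [(i, y + (2 * t + 1), pvGet2 map (nx - t) (ny - t - 1)),
     (i, y + (2 * t + 2), pvGet2 map (nx - t - 1) (ny - t - 1))])

def cwRow (map : List (List Char)) (i : Nat) : List (Nat × Nat × Char) :=
  (i, map.length - 1 - i, pvGet2 map (map.length - 1) (2 * i)) ::
    cwPairs map i i (map.length - 1 - i) (map.length - 1) (2 * i)

def ccwPairs (map : List (List Char)) (i T y nx ny : Nat) : List (Nat × Nat × Char) :=
  (List.range T).flatMap (fun t =>
    [(i, y + (2 * t + 1), pvGet2 map (nx + t + 1) (ny - t)),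
     (i, y + (2 * t + 2), pvGet2 map (nx + t + 1) (ny - t - 1))])

def ccwRow (map : List (List Char)) (c0 : Nat) (i : Nat) : List (Nat × Nat × Char) :=
  (i, map.length - 1 - i, pvGet2 map (map.length - i - 1) (c0 - i - 1)) ::
    ccwPairs map i i (map.length - 1 - i) (map.length - i - 1) (c0 - i - 1)

def fillRow (grid : List String) (i : Nat) : List (Nat × Nat × Char) :=
  (List.range ((grid.getD i "").toList.length)).map
    (fun j => (i, grid.length - 1 - i + j, (grid.getD i "").toList.getD j '.'))

theorem cwPairs_succ (map : List (List Char)) (i T y nx ny : Nat) :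
    cwPairs map i (T + 1) y nx ny = cwPairs map i T y nx ny ++
      [(i, y + (2 * T + 1), pvGet2 map (nx - T) (ny - T - 1)),
       (i, y + (2 * T + 2), pvGet2 map (nx - T - 1) (ny - T - 1))] := by
  simp [cwPairs, List.range_succ]

theorem ccwPairs_succ (map : List (List Char)) (i T y nx ny : Nat) :
    ccwPairs map i (T + 1) y nx ny = ccwPairs map i T y nx ny ++
      [(i, y + (2 * T + 1), pvGet2 map (nx + T + 1) (ny - T)),
       (i, y + (2 * T + 2), pvGet2 map (nx + T + 1) (ny - T - 1))] := by
  simp [ccwPairs, List.range_succ]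

-- ---- inner loops compute their write lists ----
theorem wise_inner (map : List (List Char)) (i y nx ny : Nat) :
    ∀ (T : Nat) (nm : List (List Char)),
      (List.range T).foldl (pvWiseStep map i) (nm, y, nx, ny)
        = (applyW nm (cwPairs map i T y nx ny), y + 2 * T, nx - T, ny - T) := by
  intro T
  induction T with
  | zero => intro nm; simp [cwPairs, applyW]
  | succ T ih =>
    intro nm
    rw [List.range_succ, List.foldl_append, ih]
    simp only [List.foldl_cons, List.foldl_nil, pvWiseStep]
    rw [cwPairs_succ, applyW_append]
    simp only [applyW, List.foldl_cons, List.foldl_nil]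
    have e1 : y + 2 * T + 1 = y + (2 * T + 1) := by omega
    have e2 : y + 2 * T + 2 = y + (2 * T + 2) := by omega
    simp only [Prod.mk.injEq]
    exact ⟨by rw [e1, e2], by omega, by omega, by omega⟩

theorem ccw_inner (map : List (List Char)) (i y nx ny : Nat) :
    ∀ (T : Nat) (nm : List (List Char)),
      (List.range T).foldl (pvCcwStep map i) (nm, y, nx, ny)
        = (applyW nm (ccwPairs map i T y nx ny), y + 2 * T, nx + T, ny - T) := by
  intro T
  induction T with
  | zero => intro nm; simp [ccwPairs, applyW]
  | succ T ih =>
    intro nm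
    rw [List.range_succ, List.foldl_append, ih]
    simp only [List.foldl_cons, List.foldl_nil, pvCcwStep]
    rw [ccwPairs_succ, applyW_append]
    simp only [applyW, List.foldl_cons, List.foldl_nil]
    have e1 : y + 2 * T + 1 = y + (2 * T + 1) := by omega
    have e2 : y + 2 * T + 2 = y + (2 * T + 2) := by omega
    simp only [Prod.mk.injEq]
    exact ⟨by rw [e1, e2], by omega, by omega, by omega⟩

theorem pvWiseOuter_eq (map nm : List (List Char)) (i : Nat) :
    pvWiseOuter map nm i = applyW nm (cwRow map i) := by
  rw [pvWiseOuter, wise_inner]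
  rfl

theorem wiseA_eq (map : List (List Char)) :
    wiseA map = rowFold (cwRow map) (pvCopy map) map.length := by
  rw [wiseA, rowFold]
  congr 1
  funext nm i
  exact pvWiseOuter_eq map nm i

theorem ccw_fold_eq (map : List (List Char)) (c0 : Nat) :
    ∀ (M : Nat) (nm : List (List Char)),
      (List.range M).foldl (pvCcwOuter map) (nm, map.length, c0)
        = (rowFold (ccwRow map c0) nm M, map.length - M, c0 - M) := by
  intro M
  induction M with
  | zero => intro nm; simp [rowFold]
  | succ M ih =>
    intro nm
    rw [List.range_succ, List.foldl_append, ih, rowFold_succ]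
    simp only [List.foldl_cons, List.foldl_nil, pvCcwOuter, ccw_inner]
    simp only [Prod.mk.injEq]
    refine ⟨?_, by omega, by omega⟩
    rw [ccwRow]
    rfl

theorem counterWiseA_eq (map : List (List Char)) :
    counterWiseA map
      = rowFold (ccwRow map ((map.getD 0 []).length)) (pvCopy map) map.length := by
  rw [counterWiseA, ccw_fold_eq]

theorem pvFillOuter_eq (grid : List String) (ng : List (List Char)) (i : Nat) :
    pvFillOuter grid ng i = applyW ng (fillRow grid i) := by
  rw [pvFillOuter, fillRow, applyW, List.foldl_map]

theorem fill_eq (grid : List String) (ng0 : List (List Char)) :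
    (List.range grid.length).foldl (pvFillOuter grid) ng0
      = rowFold (fillRow grid) ng0 grid.length := by
  rw [rowFold]
  congr 1
  funext ng i
  exact pvFillOuter_eq grid ng i

-- ---- last-write tables of the three write lists ----
theorem lastW_cwPairs (map : List (List Char)) (i y nx ny : Nat) (j : Nat) (d : Char) :
    ∀ T, lastW (cwPairs map i T y nx ny) j d
      = if y + 1 ≤ j ∧ j ≤ y + 2 * T then
          pvGet2 map (nx - (j - y) / 2) (ny - ((j - y) + 1) / 2) else d := by
  intro T
  induction T with
  | zero =>
    rw [show cwPairs map i 0 y nx ny = [] from rfl]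
    show d = _
    rw [if_neg (by omega)]
  | succ T ih =>
    rw [cwPairs_succ, lastW_append, ih]
    simp only [lastW, List.foldl_cons, List.foldl_nil]
    by_cases hA : y + (2 * T + 2) = j
    · rw [if_pos hA, if_pos (show y + 1 ≤ j ∧ j ≤ y + 2 * (T + 1) by omega)]
      have e1 : nx - T - 1 = nx - (j - y) / 2 := by omega
      have e2 : ny - T - 1 = ny - ((j - y) + 1) / 2 := by omega
      rw [e1, e2]
    · rw [if_neg hA]
      by_cases hB : y + (2 * T + 1) = j
      · rw [if_pos hB, if_pos (show y + 1 ≤ j ∧ j ≤ y + 2 * (T + 1) by omega)]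
        have e1 : nx - T = nx - (j - y) / 2 := by omega
        have e2 : ny - T - 1 = ny - ((j - y) + 1) / 2 := by omega
        rw [e1, e2]
      · rw [if_neg hB]
        by_cases hC : y + 1 ≤ j ∧ j ≤ y + 2 * T
        · rw [if_pos hC, if_pos (by omega)]
        · rw [if_neg hC, if_neg (by omega)]

theorem lastW_ccwPairs (map : List (List Char)) (i y nx ny : Nat) (j : Nat) (d : Char) :
    ∀ T, lastW (ccwPairs map i T y nx ny) j d
      = if y + 1 ≤ j ∧ j ≤ y + 2 * T then
          pvGet2 map (nx + ((j - y) + 1) / 2) (ny - (j - y) / 2) else d := by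
  intro T
  induction T with
  | zero =>
    rw [show ccwPairs map i 0 y nx ny = [] from rfl]
    show d = _
    rw [if_neg (by omega)]
  | succ T ih =>
    rw [ccwPairs_succ, lastW_append, ih]
    simp only [lastW, List.foldl_cons, List.foldl_nil]
    by_cases hA : y + (2 * T + 2) = j
    · rw [if_pos hA, if_pos (show y + 1 ≤ j ∧ j ≤ y + 2 * (T + 1) by omega)]
      have e1 : nx + T + 1 = nx + ((j - y) + 1) / 2 := by omega
      have e2 : ny - T - 1 = ny - (j - y) / 2 := by omega
      rw [e1, e2]
    · rw [if_neg hA]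
      by_cases hB : y + (2 * T + 1) = j
      · rw [if_pos hB, if_pos (show y + 1 ≤ j ∧ j ≤ y + 2 * (T + 1) by omega)]
        have e1 : nx + T + 1 = nx + ((j - y) + 1) / 2 := by omega
        have e2 : ny - T = ny - (j - y) / 2 := by omega
        rw [e1, e2]
      · rw [if_neg hB]
        by_cases hC : y + 1 ≤ j ∧ j ≤ y + 2 * T
        · rw [if_pos hC, if_pos (by omega)]
        · rw [if_neg hC, if_neg (by omega)]

theorem lastW_cwRow (map : List (List Char)) (i j : Nat) (d : Char) :
    lastW (cwRow map i) j d
      = if map.length - 1 - i ≤ j ∧ j ≤ map.length - 1 - i + 2 * i then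
          pvGet2 map (map.length - 1 - (j - (map.length - 1 - i)) / 2)
            (2 * i - ((j - (map.length - 1 - i)) + 1) / 2)
        else d := by
  rw [cwRow, lastW_cons]
  dsimp only
  rw [lastW_cwPairs]
  by_cases h0 : map.length - 1 - i = j
  · rw [if_pos h0]
    by_cases hin : map.length - 1 - i + 1 ≤ j ∧ j ≤ map.length - 1 - i + 2 * i
    · rw [if_pos hin, if_pos (by omega)]
    · rw [if_neg hin, if_pos (by omega)]
      have e1 : map.length - 1 - (j - (map.length - 1 - i)) / 2 = map.length - 1 := by omega
      have e2 : 2 * i - ((j - (map.length - 1 - i)) + 1) / 2 = 2 * i := by omega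
      rw [e1, e2]
  · rw [if_neg h0]
    by_cases hin : map.length - 1 - i + 1 ≤ j ∧ j ≤ map.length - 1 - i + 2 * i
    · rw [if_pos hin, if_pos (by omega)]
    · rw [if_neg hin, if_neg (by omega)]

theorem lastW_ccwRow (map : List (List Char)) (c0 i j : Nat) (d : Char) :
    lastW (ccwRow map c0 i) j d
      = if map.length - 1 - i ≤ j ∧ j ≤ map.length - 1 - i + 2 * i then
          pvGet2 map (map.length - i - 1 + ((j - (map.length - 1 - i)) + 1) / 2)
            (c0 - i - 1 - (j - (map.length - 1 - i)) / 2)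
        else d := by
  rw [ccwRow, lastW_cons]
  dsimp only
  rw [lastW_ccwPairs]
  by_cases h0 : map.length - 1 - i = j
  · rw [if_pos h0]
    by_cases hin : map.length - 1 - i + 1 ≤ j ∧ j ≤ map.length - 1 - i + 2 * i
    · rw [if_pos hin, if_pos (by omega)]
    · rw [if_neg hin, if_pos (by omega)]
      have e1 : map.length - i - 1 + ((j - (map.length - 1 - i)) + 1) / 2
          = map.length - i - 1 := by omega
      have e2 : c0 - i - 1 - (j - (map.length - 1 - i)) / 2 = c0 - i - 1 := by omega
      rw [e1, e2]
  · rw [if_neg h0]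
    by_cases hin : map.length - 1 - i + 1 ≤ j ∧ j ≤ map.length - 1 - i + 2 * i
    · rw [if_pos hin, if_pos (by omega)]
    · rw [if_neg hin, if_neg (by omega)]

theorem lastW_mapRange (i y0 : Nat) (v : Nat → Char) (j : Nat) (d : Char) :
    ∀ L, lastW ((List.range L).map (fun t => (i, y0 + t, v t))) j d
      = if y0 ≤ j ∧ j < y0 + L then v (j - y0) else d := by
  intro L
  induction L with
  | zero =>
    show d = _
    rw [if_neg (by omega)]
  | succ L ih =>
    rw [List.range_succ, List.map_append, lastW_append, ih]
    simp only [List.map_cons, List.map_nil, lastW, List.foldl_cons, List.foldl_nil]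
    by_cases hA : y0 + L = j
    · rw [if_pos hA, if_pos (by omega)]
      have e : L = j - y0 := by omega
      rw [e]
    · rw [if_neg hA]
      by_cases hB : y0 ≤ j ∧ j < y0 + L
      · rw [if_pos hB, if_pos (by omega)]
      · rw [if_neg hB, if_neg (by omega)]

theorem lastW_fillRow (grid : List String) (i j : Nat) (d : Char) :
    lastW (fillRow grid i) j d
      = if grid.length - 1 - i ≤ j ∧
            j < grid.length - 1 - i + (grid.getD i "").toList.length then
          (grid.getD i "").toList.getD (j - (grid.length - 1 - i)) '.'
        else d := by
  rw [fillRow, lastW_mapRange i (grid.length - 1 - i)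
    (fun t => (grid.getD i "").toList.getD t '.') j d]

-- ---- first components of the write lists ----
theorem fillRow_fst (grid : List String) : ∀ i, ∀ w ∈ fillRow grid i, w.1 = i := by
  intro i w hw
  simp only [fillRow, List.mem_map, List.mem_range] at hw
  obtain ⟨t, _, rfl⟩ := hw
  rfl

theorem cwRow_fst (map : List (List Char)) : ∀ i, ∀ w ∈ cwRow map i, w.1 = i := by
  intro i w hw
  simp only [cwRow, cwPairs, List.mem_cons, List.mem_flatMap, List.mem_range] at hw
  rcases hw with rfl | ⟨t, _, hw⟩
  · rfl
  · rcases hw with rfl | hw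
    · rfl
    rcases hw with rfl | hw
    · rfl
    cases hw

theorem ccwRow_fst (map : List (List Char)) (c0 : Nat) :
    ∀ i, ∀ w ∈ ccwRow map c0 i, w.1 = i := by
  intro i w hw
  simp only [ccwRow, ccwPairs, List.mem_cons, List.mem_flatMap, List.mem_range] at hw
  rcases hw with rfl | ⟨t, _, hw⟩
  · rfl
  · rcases hw with rfl | hw
    · rfl
    rcases hw with rfl | hw
    · rfl
    cases hw

-- ---- the padded grid ----
def padF (grid : List String) (i j : Nat) : Char :=
  if grid.length - 1 - i ≤ j ∧ j < grid.length - 1 - i + (grid.getD i "").toList.length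
  then (grid.getD i "").toList.getD (j - (grid.length - 1 - i)) '.' else '.'

theorem getD_ng0 (rows cols i : Nat) (h : i < rows) :
    ((List.range rows).map (fun _ => List.replicate cols '.')).getD i [] =
      List.replicate cols '.' := by
  rw [List.getD_eq_getElem _ _ (by simpa using h)]
  simp

theorem pvGet2_ng0 (rows cols i j : Nat) :
    pvGet2 ((List.range rows).map (fun _ => List.replicate cols '.')) i j = '.' := by
  unfold pvGet2
  rcases Nat.lt_or_ge i rows with h | h
  · rw [getD_ng0 rows cols i h, List.getD_eq_getElem?_getD, List.getElem?_replicate]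
    split_ifs <;> rfl
  · have h0 : ((List.range rows).map (fun _ => List.replicate cols '.')).getD i [] = [] := by
      rw [List.getD_eq_getElem?_getD,
        List.getElem?_eq_none (by rw [List.length_map, List.length_range]; exact h)]
      rfl
    rw [h0]
    rfl

theorem pvGet2_ng1 (grid : List String)
    (hpre2 : ∀ r, r < grid.length → (grid.getD r "").toList.length ≤ grid.length + r)
    (r jj : Nat) (hr : r < grid.length) :
    pvGet2 ((List.range grid.length).foldl (pvFillOuter grid)
        ((List.range grid.length).map (fun _ => List.replicate (2 * (grid.length - 1) + 1) '.'))) r jj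
      = padF grid r jj := by
  have hcol : ∀ w ∈ fillRow grid r, w.2.1 <
      ((((List.range grid.length).map (fun _ => List.replicate (2 * (grid.length - 1) + 1) '.'))).getD r []).length := by
    intro w hw
    simp only [fillRow, List.mem_map, List.mem_range] at hw
    obtain ⟨t, ht, rfl⟩ := hw
    rw [getD_ng0 _ _ _ hr, List.length_replicate]
    show grid.length - 1 - r + t < 2 * (grid.length - 1) + 1
    have := hpre2 r hr
    omega
  rw [fill_eq, pvGet2_rowFold_row (fillRow grid) (fillRow_fst grid) _ _ _ _ hr hcol,
    lastW_fillRow, pvGet2_ng0, padF]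

-- ---- what the rotations compute, cell by cell ----
theorem pvGet2_wiseA (map : List (List Char)) (C : Nat)
    (hrow : ∀ r, r < map.length → (map.getD r []).length = C)
    (hC : 2 * (map.length - 1) + 1 ≤ C)
    (i j : Nat) (hi : i < map.length) :
    pvGet2 (wiseA map) i j
      = if map.length - 1 - i ≤ j ∧ j ≤ map.length - 1 - i + 2 * i then
          pvGet2 map (map.length - 1 - (j - (map.length - 1 - i)) / 2)
            (2 * i - ((j - (map.length - 1 - i)) + 1) / 2)
        else pvGet2 map i j := by
  have hcol : ∀ w ∈ cwRow map i, w.2.1 < (map.getD i []).length := by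
    intro w hw
    rw [hrow i hi]
    simp only [cwRow, cwPairs, List.mem_cons, List.mem_flatMap, List.mem_range] at hw
    rcases hw with rfl | ⟨t, ht, hw⟩
    · show map.length - 1 - i < C; omega
    · rcases hw with rfl | hw
      · show map.length - 1 - i + (2 * t + 1) < C; omega
      rcases hw with rfl | hw
      · show map.length - 1 - i + (2 * t + 2) < C; omega
      cases hw
  rw [wiseA_eq, pvCopy_eq,
    pvGet2_rowFold_row (cwRow map) (cwRow_fst map) map map.length i j hi hcol,
    lastW_cwRow]

theorem pvGet2_ccwA (map : List (List Char)) (C : Nat)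
    (hrow : ∀ r, r < map.length → (map.getD r []).length = C)
    (hC : 2 * (map.length - 1) + 1 ≤ C)
    (i j : Nat) (hi : i < map.length) :
    pvGet2 (counterWiseA map) i j
      = if map.length - 1 - i ≤ j ∧ j ≤ map.length - 1 - i + 2 * i then
          pvGet2 map (map.length - i - 1 + ((j - (map.length - 1 - i)) + 1) / 2)
            ((map.getD 0 []).length - i - 1 - (j - (map.length - 1 - i)) / 2)
        else pvGet2 map i j := by
  have hcol : ∀ w ∈ ccwRow map ((map.getD 0 []).length) i, w.2.1 < (map.getD i []).length := by
    intro w hw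
    rw [hrow i hi]
    simp only [ccwRow, ccwPairs, List.mem_cons, List.mem_flatMap, List.mem_range] at hw
    rcases hw with rfl | ⟨t, ht, hw⟩
    · show map.length - 1 - i < C; omega
    · rcases hw with rfl | hw
      · show map.length - 1 - i + (2 * t + 1) < C; omega
      rcases hw with rfl | hw
      · show map.length - 1 - i + (2 * t + 2) < C; omega
      cases hw
  rw [counterWiseA_eq, pvCopy_eq,
    pvGet2_rowFold_row (ccwRow map ((map.getD 0 []).length)) (ccwRow_fst map _)
      map map.length i j hi hcol,
    lastW_ccwRow]

-- ---- the padded-grid value seen through B's _cell helper ----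
theorem padF_cellB (grid : List String) (r s : Nat) :
    pvCellB grid (r : Int) (s : Nat) = padF grid r (grid.length - 1 - r + s) := by
  simp only [pvCellB, padF, Int.toNat_natCast]
  by_cases h : s < (grid.getD r "").toList.length
  · rw [if_pos (by constructor <;> omega), if_pos (by omega)]
    have e : grid.length - 1 - r + s - (grid.length - 1 - r) = s := by omega
    rw [e]
  · rw [if_neg (by omega), if_neg (by omega)]

-- ---- final-output helper shapes shared by the two programs ----
theorem foldl_if_filterMap (l : List Nat) (f : Nat → Char) :
    l.foldl (fun acc j => if f j ≠ '.' then acc ++ [f j] else acc) [] =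
      l.filterMap (fun j => if f j ≠ '.' then some (f j) else none) := by
  suffices h : ∀ acc, l.foldl (fun acc j => if f j ≠ '.' then acc ++ [f j] else acc) acc
      = acc ++ l.filterMap (fun j => if f j ≠ '.' then some (f j) else none) by
    simpa using h []
  induction l with
  | nil => intro acc; simp
  | cons a l ih =>
    intro acc
    rw [List.foldl_cons, List.filterMap_cons]
    by_cases h : f a ≠ '.'
    · rw [if_pos h, if_pos h, ih]
      simp
    · rw [if_neg h, if_neg h, ih]

theorem ifsome_congr {x y : Char} (h : x = y) :
    (if x ≠ '.' then some x else none) = (if y ≠ '.' then some y else none) := by rw [h]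

-- ---- the main equality on nonempty grids ----
theorem main_eq (grid : List String) (clockwise : Bool)
    (hpre2 : ∀ r, r < grid.length → (grid.getD r "").toList.length ≤ grid.length + r)
    (hn : 1 ≤ grid.length) :
    solution grid clockwise = solution_alt grid clockwise := by
  simp only [solution, solution_alt]
  set NG1 := (List.range grid.length).foldl (pvFillOuter grid)
      ((List.range grid.length).map (fun _ => List.replicate (2 * (grid.length - 1) + 1) '.'))
    with hNG1
  have hlen : NG1.length = grid.length := by
    rw [hNG1, fill_eq, length_rowFold]
    simp
  have hrowlen : ∀ r, r < grid.length → (NG1.getD r []).length = 2 * (grid.length - 1) + 1 := by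
    intro r hr
    rw [hNG1, fill_eq, rowlen_rowFold, getD_ng0 _ _ _ hr, List.length_replicate]
  have hpad : ∀ r jj, r < grid.length → pvGet2 NG1 r jj = padF grid r jj := by
    intro r jj hr
    rw [hNG1]
    exact pvGet2_ng1 grid hpre2 r jj hr
  rw [PySem.List.foldl_append_singleton_eq_map, List.nil_append]
  refine List.map_congr_left ?_
  intro i hi0
  rw [List.mem_range] at hi0
  congr 1
  rw [foldl_if_filterMap]
  rw [show 2 * (grid.length - 1) + 1 = 2 * grid.length - 1 from by omega]
  refine List.filterMap_congr ?_
  intro j hj0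
  rw [List.mem_range] at hj0
  apply ifsome_congr
  cases clockwise with
  | true =>
    try simp only [reduceIte]
    rw [pvGet2_wiseA NG1 (2 * (grid.length - 1) + 1)
      (fun r hr => hrowlen r (by omega)) (by rw [hlen]) i j (by omega), hlen]
    split
    next htri =>
      rw [if_pos (show (0:Int) ≤ (j:Int) - ((grid.length : Int) - 1 - (i:Int)) ∧
          (j:Int) - ((grid.length : Int) - 1 - (i:Int)) ≤ 2 * (i:Int) from by
        constructor <;> omega)]
      dsimp only
      rw [hpad _ _ (by omega)]
      have hK : (j:Int) - ((grid.length : Int) - 1 - (i:Int))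
          = ((j - (grid.length - 1 - i) : Nat) : Int) := by omega
      rw [hK]
      have hfd : PySem.Int.floordiv (((j - (grid.length - 1 - i)) : Nat) : Int) 2
          = ((((j - (grid.length - 1 - i)) / 2 : Nat)) : Int) := by
        exact_mod_cast PySem.Int.floordiv_natCast _ 2
      rw [hfd]
      have e1 : ((grid.length : Int) - 1 - (((j - (grid.length - 1 - i)) / 2 : Nat) : Int))
          = (((grid.length - 1 - (j - (grid.length - 1 - i)) / 2 : Nat)) : Int) := by omega
      have e2 : (2 * (i:Int) - (((j - (grid.length - 1 - i)) : Nat) : Int))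
          = (((2 * i - (j - (grid.length - 1 - i)) : Nat)) : Int) := by omega
      rw [e1, e2, padF_cellB]
      congr 1
      omega
    next htri =>
      rw [if_neg (show ¬((0:Int) ≤ (j:Int) - ((grid.length : Int) - 1 - (i:Int)) ∧
          (j:Int) - ((grid.length : Int) - 1 - (i:Int)) ≤ 2 * (i:Int)) from by omega)]
      dsimp only
      rw [hpad i j hi0]
      rcases Nat.lt_or_ge j (grid.length - 1 - i) with hlt | hge
      · simp only [padF, pvCellB, Int.toNat_natCast]
        rw [if_neg (by omega), if_neg (by omega)]
      · have hK : (j:Int) - ((grid.length : Int) - 1 - (i:Int))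
            = ((j - (grid.length - 1 - i) : Nat) : Int) := by omega
        rw [hK, padF_cellB]
        congr 1
        omega
  | false =>
    rw [if_neg Bool.false_ne_true, if_neg Bool.false_ne_true]
    try rw [if_neg Bool.false_ne_true]
    rw [pvGet2_ccwA NG1 (2 * (grid.length - 1) + 1)
      (fun r hr => hrowlen r (by omega)) (by rw [hlen]) i j (by omega), hlen,
      hrowlen 0 (by omega)]
    split
    next htri =>
      rw [if_pos (show (0:Int) ≤ (j:Int) - ((grid.length : Int) - 1 - (i:Int)) ∧
          (j:Int) - ((grid.length : Int) - 1 - (i:Int)) ≤ 2 * (i:Int) from by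
        constructor <;> omega)]
      dsimp only
      rw [hpad _ _ (by omega)]
      have hK : (j:Int) - ((grid.length : Int) - 1 - (i:Int))
          = ((j - (grid.length - 1 - i) : Nat) : Int) := by omega
      rw [hK]
      have hK1 : (((j - (grid.length - 1 - i)) : Nat) : Int) + 1
          = (((j - (grid.length - 1 - i)) + 1 : Nat) : Int) := by omega
      rw [hK1]
      have hfd : PySem.Int.floordiv ((((j - (grid.length - 1 - i)) + 1) : Nat) : Int) 2
          = (((((j - (grid.length - 1 - i)) + 1) / 2 : Nat)) : Int) := by
        exact_mod_cast PySem.Int.floordiv_natCast _ 2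
      rw [hfd]
      have hmd : PySem.Int.mod (((j - (grid.length - 1 - i)) : Nat) : Int) 2
          = ((((j - (grid.length - 1 - i)) % 2 : Nat)) : Int) := by
        exact_mod_cast PySem.Int.mod_natCast _ 2
      rw [hmd]
      have e1 : ((grid.length : Int) - 1 - (i:Int) +
            ((((j - (grid.length - 1 - i)) + 1) / 2 : Nat) : Int))
          = (((grid.length - 1 - i + ((j - (grid.length - 1 - i)) + 1) / 2 : Nat)) : Int) := by
        omega
      have e2 : (2 * ((grid.length : Int) - 1 - (i:Int)) +
            (((j - (grid.length - 1 - i)) % 2 : Nat) : Int))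
          = (((2 * (grid.length - 1 - i) + (j - (grid.length - 1 - i)) % 2 : Nat)) : Int) := by
        omega
      rw [e1, e2, padF_cellB]
      have er : grid.length - i - 1 + ((j - (grid.length - 1 - i)) + 1) / 2
          = grid.length - 1 - i + ((j - (grid.length - 1 - i)) + 1) / 2 := by omega
      rw [er]
      congr 1
      omega
    next htri =>
      rw [if_neg (show ¬((0:Int) ≤ (j:Int) - ((grid.length : Int) - 1 - (i:Int)) ∧
          (j:Int) - ((grid.length : Int) - 1 - (i:Int)) ≤ 2 * (i:Int)) from by omega)]
      dsimp only
      rw [hpad i j hi0]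
      rcases Nat.lt_or_ge j (grid.length - 1 - i) with hlt | hge
      · simp only [padF, pvCellB, Int.toNat_natCast]
        rw [if_neg (by omega), if_neg (by omega)]
      · have hK : (j:Int) - ((grid.length : Int) - 1 - (i:Int))
            = ((j - (grid.length - 1 - i) : Nat) : Int) := by omega
        rw [hK, padF_cellB]
        congr 1
        omega

-- ===== VERDICT (by name: the statement is the Claim_ definition above) =====
theorem solution_spec : Claim_equal_solution := by
  intro grid clockwise _ hpre
  unfold Spec_solution
  by_cases hnil : grid = []
  · subst hnil
    rcases hpre.1 with hcw | hne
    · subst hcw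
      decide
    · exact absurd rfl hne
  · have hn : 1 ≤ grid.length := by
      cases grid with
      | nil => exact absurd rfl hnil
      | cons a t => simp
    exact main_eq grid clockwise hpre.2 hn
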